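-- pv_equiv track=rewrite | github.com/niall-dance-sanchez/continued-learning | advent-of-code/day3/main.py | calculate_gamma_rate
-- ===== SOURCE A (Python) =====
-- def calculate_gamma_rate(binary_list: list[str]) -> str:
--     """Calculates the gamma rate from a list of binary numbers."""
--
--     gamma_rate = ""
--
--     for i in range(len(binary_list[0])):
--         counter = {"0": 0, "1": 0}
--         for b in binary_list:
--             counter[b[i]] += 1
--         gamma_rate += max(counter, key=counter.get)
--
--     return gamma_rate
-- ===== SOURCE B (Python) =====
-- def calculate_gamma_rate(binary_list: list[str]) -> str:
--     """Calculates the gamma rate from a list of binary numbers."""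
--
--     n = len(binary_list)
--     return "".join(
--         sorted(b[i] for b in binary_list)[(n - 1) // 2]
--         for i in range(len(binary_list[0]))
--     )
-- ===== Notes on version B (the rewrite author's own statement) =====
-- stated objective: alternative
-- what changed: B abandons A's per-position dict counters and key-max entirely: for each bit position it extracts the column, SORTS it and reads off the lower median sorted(column)[(n-1)//2], which for a 0/1 column is exactly the majority bit with ties going to '0'.
import Mathlib
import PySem

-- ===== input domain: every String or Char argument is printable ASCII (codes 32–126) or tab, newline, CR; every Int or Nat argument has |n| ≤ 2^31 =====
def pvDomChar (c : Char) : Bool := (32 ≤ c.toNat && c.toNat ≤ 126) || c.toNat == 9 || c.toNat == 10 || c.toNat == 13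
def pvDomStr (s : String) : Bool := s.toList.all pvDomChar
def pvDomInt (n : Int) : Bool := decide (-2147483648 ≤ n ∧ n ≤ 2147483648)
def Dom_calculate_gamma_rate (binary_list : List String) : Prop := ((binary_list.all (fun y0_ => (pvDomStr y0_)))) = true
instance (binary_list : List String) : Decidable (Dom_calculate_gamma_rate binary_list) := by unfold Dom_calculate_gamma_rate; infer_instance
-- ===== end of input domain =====

-- B replaces A's per-position dict counters and key-max by a different algorithm: per position it
-- SORTS the column of bits and reads the lower median sorted(column)[(n-1)//2], which for a 0/1
-- column is exactly the majority bit with ties to '0'.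

-- ===== PORT A =====
def calculate_gamma_rate (binary_list : List String) : String :=
  -- gamma_rate = ""; for i in range(len(binary_list[0])): … ; return gamma_rate
  let first := (PySem.List.pyGet? binary_list 0).getD ""   -- binary_list[0]; IndexError (none) excluded by Pre_
  let gamma : List Char :=
    (PySem.List.pyRange 0 (PySem.Str.len first) 1).foldl
      (fun gamma i =>
        -- counter = {"0": 0, "1": 0}
        let counter0 : PySem.Dict Char Int := ((PySem.Dict.empty).insert '0' 0).insert '1' 0
        -- for b in binary_list: counter[b[i]] += 1   (IndexError/KeyError excluded by Pre_)
        let counter := binary_list.foldl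
          (fun c b => c.modify ((PySem.Str.pyGet? b i).getD ' ') 0 (· + 1)) counter0
        -- gamma_rate += max(counter, key=counter.get)
        gamma ++ [(PySem.List.max? counter.keys (fun k => counter.getD k 0)).getD ' '])
      []
  String.ofList gamma

-- ===== PORT B =====
def calculate_gamma_rate_alt (binary_list : List String) : String :=
  -- n = len(binary_list)
  let n : Int := binary_list.length
  -- "".join(sorted(b[i] for b in binary_list)[(n - 1) // 2] for i in range(len(binary_list[0])))
  String.ofList
    ((PySem.List.pyRange 0 (PySem.Str.len ((PySem.List.pyGet? binary_list 0).getD "")) 1).map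
      (fun i =>
        (PySem.List.pyGet?
          (PySem.List.sorted (binary_list.map (fun b => (PySem.Str.pyGet? b i).getD ' '))
            (fun c => c) false)
          (PySem.Int.floordiv (n - 1) 2)).getD ' '))

-- ===== PRECONDITION & SPEC =====
-- Pre_ excludes exactly the inputs where A raises: the empty list (IndexError on binary_list[0]),
-- a string shorter than the first (IndexError on b[i]) and a non-'0'/'1' character in a scanned
-- position (KeyError on counter[b[i]]).
def Pre_calculate_gamma_rate (binary_list : List String) : Prop :=
  binary_list ≠ [] ∧
  (binary_list.all (fun s => binary_list.headI.toList.length ≤ s.toList.length &&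
     (s.toList.take binary_list.headI.toList.length).all (fun c => c == '0' || c == '1'))) = true
instance (binary_list : List String) : Decidable (Pre_calculate_gamma_rate binary_list) := by
  unfold Pre_calculate_gamma_rate; infer_instance
def pvWitness_calculate_gamma_rate : List String := ["01", "11"]
def Spec_calculate_gamma_rate (binary_list : List String) (out : String) : Prop := out = calculate_gamma_rate_alt binary_list
instance (binary_list : List String) (out : String) : Decidable (Spec_calculate_gamma_rate binary_list out) := by unfold Spec_calculate_gamma_rate; infer_instance

-- ===== CLAIM (what is proved, stated in full; the proofs are below) =====
def Claim_equal_calculate_gamma_rate : Prop := ∀ (binary_list : List String), Dom_calculate_gamma_rate binary_list → Pre_calculate_gamma_rate binary_list → Spec_calculate_gamma_rate binary_list (calculate_gamma_rate binary_list)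

-- ===== LEMMAS AND PROOFS =====

-- whether string t has a '1' at position j
def pvHit (j : Nat) (t : String) : Bool := (t.toList[j]?).getD ' ' == '1'
-- number of strings with a '1' at position j
def pvCnt (bl : List String) (j : Nat) : Nat := bl.countP (pvHit j)
-- the output character at position j (2·ones > n, tie to '0')
def pvChar (bl : List String) (j : Nat) : Char :=
  if 2 * (pvCnt bl j : Int) > (bl.length : Int) then '1' else '0'

lemma pv_update_of_mem {s : PySem.Set Char} (xs : List Char)
    (h : ∀ x ∈ xs, s.contains x = true) : PySem.Set.update s xs = s := by
  induction xs with
  | nil => rfl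
  | cons x xs ih =>
    have hx := h x (by simp)
    simp only [PySem.Set.update, List.foldl_cons, PySem.Set.add, hx, if_pos]
    exact ih (fun y hy => h y (by simp [hy]))

lemma pv_A_counter (m j : Nat) (hj : j < m) (l : List String)
    (hl : ∀ t ∈ l, m ≤ t.toList.length ∧ ∀ c ∈ t.toList.take m, c = '0' ∨ c = '1') :
    (l.foldl (fun c b => c.modify ((PySem.Str.pyGet? b (j : Int)).getD ' ') 0 (· + 1))
        (((PySem.Dict.empty).insert '0' 0).insert '1' 0) : PySem.Dict Char Int).keys = ['0', '1']
    ∧ (l.foldl (fun c b => c.modify ((PySem.Str.pyGet? b (j : Int)).getD ' ') 0 (· + 1))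
        (((PySem.Dict.empty).insert '0' 0).insert '1' 0) : PySem.Dict Char Int).getD '0' 0
        = ((l.length - pvCnt l j : Nat) : Int)
    ∧ (l.foldl (fun c b => c.modify ((PySem.Str.pyGet? b (j : Int)).getD ' ') 0 (· + 1))
        (((PySem.Dict.empty).insert '0' 0).insert '1' 0) : PySem.Dict Char Int).getD '1' 0
        = (pvCnt l j : Int) := by
  set d0 : PySem.Dict Char Int := ((PySem.Dict.empty).insert '0' 0).insert '1' 0 with hd0
  set key : String → Char := fun b => ((PySem.Str.pyGet? b (j : Int)).getD ' ') with hkeydef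
  have hgetel : ∀ b ∈ l, ∃ h : j < b.toList.length, key b = b.toList[j] := by
    intro b hb
    have h1 := (hl b hb).1
    refine ⟨by omega, ?_⟩
    simp [hkeydef, PySem.List.pyGet?_natCast, List.getElem?_eq_getElem (show j < b.toList.length by omega)]
  have hbin : ∀ b ∈ l, key b = '0' ∨ key b = '1' := by
    intro b hb
    obtain ⟨h, he⟩ := hgetel b hb
    rw [he]
    exact (hl b hb).2 _ (List.mem_take_iff_getElem.mpr ⟨j, by omega, by simp⟩)
  have hD : ∀ v : Char,
      (l.foldl (fun c b => c.modify (key b) 0 (· + 1)) d0).getD v 0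
        = d0.getD v 0 + (l.countP (fun b => key b == v) : Int) := by
    intro v
    rw [← List.foldl_map (f := key) (g := fun d x => d.modify x 0 (· + 1)) (l := l) (init := d0),
      PySem.Dict.getD_foldl_modify_add_one, List.count_eq_countP, List.countP_map]
    rfl
  have h1 : l.countP (fun b => key b == '1') = pvCnt l j := by
    apply List.countP_congr
    intro b hb
    obtain ⟨h, he⟩ := hgetel b hb
    simp [pvHit, List.getElem?_eq_getElem h, ← he]
  have h0 : l.countP (fun b => key b == '0') = l.length - pvCnt l j := by
    have hcc : l.countP (fun b => key b == '0') = l.countP (fun b => !(pvHit j b)) := by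
      apply List.countP_congr
      intro b hb
      obtain ⟨h, he⟩ := hgetel b hb
      have : pvHit j b = (key b == '1') := by
        simp [pvHit, List.getElem?_eq_getElem h, ← he]
      rcases hbin b hb with h0 | h0 <;> simp [this, h0]
    have hsum := List.length_eq_countP_add_countP (pvHit j) (l := l)
    have hnn : l.countP (fun b => !(pvHit j b)) = l.countP (fun a => decide ¬(pvHit j a) = true) := by
      apply List.countP_congr; intro b _; simp
    rw [hcc]
    unfold pvCnt
    omega
  refine ⟨?_, ?_, ?_⟩
  · rw [PySem.Dict.keys_foldl_modify_key l key 0 (fun _ _ v => v + 1)]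
    rw [show d0.keys = ['0', '1'] from by decide]
    apply pv_update_of_mem
    intro x hx
    obtain ⟨b, hb, rfl⟩ := List.mem_map.mp hx
    rcases hbin b hb with h | h <;> simp [h, PySem.Set.contains]
  · rw [hD '0', h0, show d0.getD '0' 0 = 0 from by decide]
    ring
  · rw [hD '1', h1, show d0.getD '1' 0 = 0 from by decide]
    ring

lemma pv_max_two (g : Char → Int) :
    (PySem.List.max? ['0','1'] g).getD ' ' = if g '0' < g '1' then '1' else '0' := by
  simp [PySem.List.max?]
  split <;> rfl

lemma pv_A_eq (bl' : List String) (hpre : Pre_calculate_gamma_rate bl') :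
    calculate_gamma_rate bl' = String.ofList ((List.range bl'.headI.toList.length).map (pvChar bl')) := by
  obtain ⟨hne, hallb⟩ := hpre
  have hall : ∀ t ∈ bl', bl'.headI.toList.length ≤ t.toList.length ∧
      ∀ c ∈ t.toList.take bl'.headI.toList.length, c = '0' ∨ c = '1' := by
    intro t ht
    have h := (List.all_eq_true.mp hallb) t ht
    simp only [Bool.and_eq_true, decide_eq_true_eq, List.all_eq_true, Bool.or_eq_true,
      beq_iff_eq] at h
    exact h
  obtain ⟨s, rest, rfl⟩ := List.exists_cons_of_ne_nil hne
  set bl := s :: rest with hbl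
  have hhead : bl.headI = s := rfl
  set m := s.toList.length with hm
  unfold calculate_gamma_rate
  simp only [hhead]
  rw [show (PySem.List.pyGet? bl 0).getD "" = s from by rw [hbl, PySem.List.pyGet?_zero_cons]; rfl, PySem.Str.len_eq,
    PySem.List.pyRange_zero_nat, List.foldl_map,
    PySem.List.foldl_append_singleton_eq_map]
  rw [List.nil_append]
  congr 1
  apply List.map_congr_left
  intro j hj
  have hj : j < m := List.mem_range.mp hj
  have hl : ∀ t ∈ bl, m ≤ t.toList.length ∧ ∀ c ∈ t.toList.take m, c = '0' ∨ c = '1' := by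
    intro t ht
    exact hall t ht
  obtain ⟨hk, h0, h1⟩ := pv_A_counter m j hj bl hl
  rw [hk, pv_max_two, h0, h1]
  have hcle : pvCnt bl j ≤ bl.length := List.countP_le_length
  unfold pvChar
  rcases Nat.lt_or_ge (2 * pvCnt bl j) (bl.length + 1) with h | h
  · rw [if_neg (by omega), if_neg (by omega)]
  · rw [if_pos (by omega), if_pos (by omega)]

-- a 0/1 character list is a permutation of zeros-then-ones
lemma pv_perm_repl (cs : List Char) (h : ∀ c ∈ cs, c = '0' ∨ c = '1') :
    cs.Perm (List.replicate (cs.count '0') '0' ++ List.replicate (cs.count '1') '1') := by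
  induction cs with
  | nil => simp
  | cons c cs ih =>
    have hrest := ih (fun x hx => h x (by simp [hx]))
    rcases h c (by simp) with rfl | rfl
    · simp only [List.count_cons_self]
      rw [List.replicate_succ]
      exact (hrest.cons _)
    · simp only [List.count_cons_self]
      rw [List.replicate_succ]
      exact (hrest.cons _).trans List.perm_middle.symm

-- ===== VERDICT helper: B's value =====
lemma pv_B_eq (bl' : List String) (hpre : Pre_calculate_gamma_rate bl') :
    calculate_gamma_rate_alt bl' = String.ofList ((List.range bl'.headI.toList.length).map (pvChar bl')) := by
  obtain ⟨hne, hallb⟩ := hpre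
  have hall : ∀ t ∈ bl', bl'.headI.toList.length ≤ t.toList.length ∧
      ∀ c ∈ t.toList.take bl'.headI.toList.length, c = '0' ∨ c = '1' := by
    intro t ht
    have h := (List.all_eq_true.mp hallb) t ht
    simp only [Bool.and_eq_true, decide_eq_true_eq, List.all_eq_true, Bool.or_eq_true,
      beq_iff_eq] at h
    exact h
  obtain ⟨s, rest, rfl⟩ := List.exists_cons_of_ne_nil hne
  set bl := s :: rest with hbl
  have hhead : bl.headI = s := rfl
  set m := s.toList.length with hm
  simp only [hhead] at hall
  unfold calculate_gamma_rate_alt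
  simp only [hhead]
  rw [show (PySem.List.pyGet? bl 0).getD "" = s from by rw [hbl, PySem.List.pyGet?_zero_cons]; rfl,
    PySem.Str.len_eq, PySem.List.pyRange_zero_nat, List.map_map]
  congr 1
  apply List.map_congr_left
  intro j hj
  have hj : j < m := List.mem_range.mp hj
  simp only [Function.comp_apply]
  set key : String → Char := fun b => ((PySem.Str.pyGet? b (j : Int)).getD ' ') with hkeydef
  have hgetel : ∀ b ∈ bl, ∃ h : j < b.toList.length, key b = b.toList[j] := by
    intro b hb
    have h1 := (hall b hb).1
    refine ⟨by omega, ?_⟩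
    simp [hkeydef, PySem.List.pyGet?_natCast, List.getElem?_eq_getElem (show j < b.toList.length by omega)]
  have hbin : ∀ c ∈ bl.map key, c = '0' ∨ c = '1' := by
    intro c hc
    obtain ⟨b, hb, rfl⟩ := List.mem_map.mp hc
    obtain ⟨h, he⟩ := hgetel b hb
    rw [he]
    exact (hall b hb).2 _ (List.mem_take_iff_getElem.mpr ⟨j, by omega, by simp⟩)
  -- counts in the column
  set o := pvCnt bl j with ho
  have hcle : o ≤ bl.length := List.countP_le_length
  have hc1 : (bl.map key).count '1' = o := by
    rw [List.count_eq_countP, List.countP_map]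
    apply List.countP_congr
    intro b hb
    obtain ⟨h, he⟩ := hgetel b hb
    simp [pvHit, List.getElem?_eq_getElem h, ← he, Function.comp]
  have hc0 : (bl.map key).count '0' = bl.length - o := by
    have htot : (bl.map key).count '0' + (bl.map key).count '1' = bl.length := by
      have := List.length_eq_countP_add_countP (fun c => c == '0') (l := bl.map key)
      have hcc : (bl.map key).countP (fun c => !(c == '0')) = (bl.map key).countP (fun c => c == '1') := by
        apply List.countP_congr
        intro c hc
        rcases hbin c hc with rfl | rfl <;> simp
      simp only [List.count_eq_countP] at *
      simp only [List.length_map] at this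
      have hnn : (bl.map key).countP (fun a => decide ¬((a == '0') = true)) = (bl.map key).countP (fun c => !(c == '0')) := by
        apply List.countP_congr; intro c _; simp
      omega
    omega
  -- the sorted column is zeros then ones
  have hsorted : PySem.List.sorted (bl.map key) (fun c => c) false
      = List.replicate (bl.length - o) '0' ++ List.replicate o '1' := by
    rw [← hc0, ← hc1]
    apply PySem.List.sorted_id_eq_of_perm_of_pairwise
    · exact (pv_perm_repl (bl.map key) hbin).symm
    · rw [List.pairwise_append]
      refine ⟨List.pairwise_replicate.mpr (by simp), List.pairwise_replicate.mpr (by simp), ?_⟩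
      intro a ha b hb
      rw [List.eq_of_mem_replicate ha, List.eq_of_mem_replicate hb]
      decide
  rw [hsorted]
  -- the median index
  have hlen : 1 ≤ bl.length := by rw [hbl]; simp
  have hfd : PySem.Int.floordiv ((bl.length : Int) - 1) 2 = (((bl.length - 1) / 2 : Nat) : Int) := by
    rw [show ((bl.length : Int) - 1) = (((bl.length - 1 : Nat)) : Int) from by omega]
    exact_mod_cast PySem.Int.floordiv_natCast (bl.length - 1) 2
  rw [hfd, PySem.List.pyGet?_natCast]
  set idx := (bl.length - 1) / 2 with hidx
  have hidxlt : idx < bl.length := by omega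
  rw [List.getElem?_eq_getElem (by simp; omega)]
  unfold pvChar
  rw [← ho]
  by_cases hmaj : 2 * (o : Int) > (bl.length : Int)
  · rw [if_pos hmaj]
    have hge : bl.length - o ≤ idx := by omega
    rw [List.getElem_append_right (by simpa using hge)]
    simp [List.getElem_replicate]
  · rw [if_neg hmaj]
    have hlt : idx < bl.length - o := by omega
    rw [List.getElem_append_left (by simpa using hlt)]
    simp [List.getElem_replicate]

-- ===== VERDICT (by name: the statement is the Claim_ definition above) =====
theorem calculate_gamma_rate_spec : Claim_equal_calculate_gamma_rate := by
  intro bl _ hpre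
  unfold Spec_calculate_gamma_rate
  rw [pv_A_eq bl hpre, pv_B_eq bl hpre]
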